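-- pv_equiv track=rewrite | github.com/anna-prins/advent-of-code | day_13_part_2.py | find_smudges_helper
-- ===== SOURCE A (Python) =====
-- def find_smudges_helper( pattern, index_1, index_2, smudges ):
--     if index_1 < 0:
--         return smudges
--     if index_2 >= len(pattern):
--         return smudges
--
--     if pattern[index_1] != pattern[index_2]:
--         for index in range(len(pattern[index_1])):
--             if pattern[index_1][index] != pattern[index_2][index]:
--                 smudges += 1
--     return find_smudges_helper( pattern, index_1 - 1, index_2 + 1, smudges )
-- ===== SOURCE B (Python) =====
-- def find_smudges_helper(pattern, index_1, index_2, smudges):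
--     count = smudges
--     i, j = index_1, index_2
--     while i >= 0 and j < len(pattern):
--         count += sum(c1 != c2 for c1, c2 in zip(pattern[i], pattern[j]))
--         i -= 1
--         j += 1
--     return count
-- ===== Notes on version B (the rewrite author's own statement) =====
-- stated objective: simpler
-- what changed: Replaced A's tail recursion with an accumulator-threading parameter and its guarded explicit index loop over range(len(row)) by an iterative while loop that unconditionally adds the number of differing positions computed with zip, dropping the row-inequality guard.
import Mathlib
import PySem

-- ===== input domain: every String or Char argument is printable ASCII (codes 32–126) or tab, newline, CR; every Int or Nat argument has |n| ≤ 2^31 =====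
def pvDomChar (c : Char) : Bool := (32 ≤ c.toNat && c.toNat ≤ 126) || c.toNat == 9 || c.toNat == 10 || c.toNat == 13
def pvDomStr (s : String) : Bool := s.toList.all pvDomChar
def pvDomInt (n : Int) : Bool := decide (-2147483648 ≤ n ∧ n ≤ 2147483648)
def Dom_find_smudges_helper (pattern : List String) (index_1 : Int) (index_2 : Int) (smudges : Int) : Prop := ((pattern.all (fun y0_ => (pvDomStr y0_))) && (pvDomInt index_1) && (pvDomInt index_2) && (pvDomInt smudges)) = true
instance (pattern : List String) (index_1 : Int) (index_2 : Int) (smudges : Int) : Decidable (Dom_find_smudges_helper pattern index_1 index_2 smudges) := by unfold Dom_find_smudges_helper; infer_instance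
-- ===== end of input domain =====

-- B replaces A's accumulator-passing recursion and guarded per-index character loop by an
-- iterative while loop that unconditionally adds a zip-based count of differing positions (objective: simpler).

-- pattern[i] (Python indexing; default unreachable under Pre_)
def fsh_get (pattern : List String) (i : Int) : String :=
  (PySem.List.pyGet? pattern i).getD ""

-- ===== PORT A =====
def find_smudges_helper (pattern : List String) (index_1 : Int) (index_2 : Int) (smudges : Int) : Int :=
  if index_1 < 0 then smudges
  else if (pattern.length : Int) ≤ index_2 then smudges
  else
    let r1 := (fsh_get pattern index_1).toList
    let r2 := (fsh_get pattern index_2).toList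
    let smudges' :=
      if r1 ≠ r2 then
        (PySem.List.pyRange 0 r1.length 1).foldl
          (fun acc index =>
            if PySem.List.pyGetD r1 index ' ' ≠ PySem.List.pyGetD r2 index ' ' then acc + 1 else acc)
          smudges
      else smudges
    find_smudges_helper pattern (index_1 - 1) (index_2 + 1) smudges'
termination_by ((pattern.length : Int) - index_2).toNat
decreasing_by omega

-- ===== PORT B =====
def fsh_rowDiff (r1 r2 : String) : Int :=
  ((r1.toList.zip r2.toList).countP (fun p => p.1 != p.2) : Int)

def fsh_loop (pattern : List String) (i : Int) (j : Int) (count : Int) : Int :=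
  if 0 ≤ i ∧ j < (pattern.length : Int) then
    fsh_loop pattern (i - 1) (j + 1)
      (count + fsh_rowDiff (fsh_get pattern i) (fsh_get pattern j))
  else count
termination_by ((pattern.length : Int) - j).toNat
decreasing_by omega

def find_smudges_helper_alt (pattern : List String) (index_1 : Int) (index_2 : Int) (smudges : Int) : Int :=
  fsh_loop pattern index_1 index_2 smudges

-- ===== PRECONDITION & SPEC =====
-- Pre_ excludes exactly the inputs on which A raises IndexError: a non-negative row index out of
-- range, index_2 below -len(pattern), or a mirrored pair of unequal rows whose upper row is longer
-- than its partner (then the inner character loop indexes past the shorter row).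
def Pre_find_smudges_helper (pattern : List String) (index_1 : Int) (index_2 : Int) (smudges : Int) : Prop :=
  index_1 < 0 ∨ (pattern.length : Int) ≤ index_2 ∨
  (index_1 < (pattern.length : Int) ∧ -(pattern.length : Int) ≤ index_2 ∧
    ∀ k : ℕ, k < index_1.toNat + 1 → index_2 + (k : Int) < (pattern.length : Int) →
      fsh_get pattern (index_1 - (k : Int)) = fsh_get pattern (index_2 + (k : Int)) ∨
      (fsh_get pattern (index_1 - (k : Int))).toList.length ≤ (fsh_get pattern (index_2 + (k : Int))).toList.length)
instance (pattern : List String) (index_1 : Int) (index_2 : Int) (smudges : Int) : Decidable (Pre_find_smudges_helper pattern index_1 index_2 smudges) := by unfold Pre_find_smudges_helper; infer_instance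

def pvWitness_find_smudges_helper : List String × Int × Int × Int := (["#.", "..", "#."], 1, 0, 0)

def Spec_find_smudges_helper (pattern : List String) (index_1 : Int) (index_2 : Int) (smudges : Int) (out : Int) : Prop := out = find_smudges_helper_alt pattern index_1 index_2 smudges
instance (pattern : List String) (index_1 : Int) (index_2 : Int) (smudges : Int) (out : Int) : Decidable (Spec_find_smudges_helper pattern index_1 index_2 smudges out) := by unfold Spec_find_smudges_helper; infer_instance

-- ===== CLAIM (what is proved, stated in full; the proofs are below) =====
def Claim_equal_find_smudges_helper : Prop := ∀ (pattern : List String) (index_1 : Int) (index_2 : Int) (smudges : Int), Dom_find_smudges_helper pattern index_1 index_2 smudges → Pre_find_smudges_helper pattern index_1 index_2 smudges → Spec_find_smudges_helper pattern index_1 index_2 smudges (find_smudges_helper pattern index_1 index_2 smudges)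

-- ===== LEMMAS AND PROOFS =====

-- equal lists contribute nothing
lemma fsh_countP_self (l : List Char) : (l.zip l).countP (fun p => p.1 != p.2) = 0 := by
  induction l with
  | nil => simp
  | cons c t ih => simpa using ih

-- equal rows contribute nothing in B
lemma fsh_rowDiff_self (r : String) : fsh_rowDiff r r = 0 := by
  unfold fsh_rowDiff
  simp [fsh_countP_self]

-- the index-indexed pairs A scans are exactly the zip of the two rows (when r1 is not longer)
lemma fsh_map_pair (l1 l2 : List Char) (h : l1.length ≤ l2.length) :
    (PySem.List.pyRange 0 (l1.length : Int) 1).map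
      (fun i => (PySem.List.pyGetD l1 i ' ', PySem.List.pyGetD l2 i ' ')) = l1.zip l2 := by
  apply List.ext_getElem
  · simp [PySem.List.length_pyRange_one, List.length_zip]; omega
  · intro k hk1 hk2
    have hk : k < l1.length := by
      simpa [PySem.List.length_pyRange_one] using hk1
    have hk2' : k < l2.length := lt_of_lt_of_le hk h
    simp [PySem.List.getElem_pyRange_one, PySem.List.pyGetD_eq_getElem, List.getElem_zip, hk, hk2']

-- A's character loop counts exactly B's zip count
lemma fsh_foldl_eq (l1 l2 : List Char) (h : l1.length ≤ l2.length) (s : Int) :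
    (PySem.List.pyRange 0 (l1.length : Int) 1).foldl
      (fun acc index =>
        if PySem.List.pyGetD l1 index ' ' ≠ PySem.List.pyGetD l2 index ' ' then acc + 1 else acc) s
    = s + ((l1.zip l2).countP (fun p => p.1 != p.2) : Int) := by
  have hmap := fsh_map_pair l1 l2 h
  calc (PySem.List.pyRange 0 (l1.length : Int) 1).foldl
        (fun acc index =>
          if PySem.List.pyGetD l1 index ' ' ≠ PySem.List.pyGetD l2 index ' ' then acc + 1 else acc) s
      = ((PySem.List.pyRange 0 (l1.length : Int) 1).map
          (fun i => (PySem.List.pyGetD l1 i ' ', PySem.List.pyGetD l2 i ' '))).foldl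
          (fun acc p => if p.1 ≠ p.2 then acc + 1 else acc) s := by
        rw [List.foldl_map]
    _ = (l1.zip l2).foldl (fun acc p => if p.1 ≠ p.2 then acc + 1 else acc) s := by rw [hmap]
    _ = s + ((l1.zip l2).countP (fun p => p.1 != p.2) : Int) := by
        induction l1.zip l2 generalizing s with
        | nil => simp
        | cons p t ih =>
          simp only [List.foldl_cons, List.countP_cons]
          by_cases hp : p.1 = p.2
          · rw [if_neg (by simp [hp]), ih]; simp [hp]
          · rw [if_pos hp, ih]; simp [hp]; ring

lemma fsh_main (m : ℕ) (pattern : List String) (i1 i2 s : Int)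
    (hm : (pattern.length : Int) - i2 ≤ m)
    (h1 : i1 < (pattern.length : Int))
    (h2 : -(pattern.length : Int) ≤ i2)
    (hrows : ∀ k : ℕ, (k : Int) ≤ i1 → i2 + (k : Int) < (pattern.length : Int) →
      fsh_get pattern (i1 - (k : Int)) = fsh_get pattern (i2 + (k : Int)) ∨
      (fsh_get pattern (i1 - (k : Int))).toList.length ≤ (fsh_get pattern (i2 + (k : Int))).toList.length) :
    find_smudges_helper pattern i1 i2 s = fsh_loop pattern i1 i2 s := by
  induction m generalizing i1 i2 s with
  | zero =>
    have hle : (pattern.length : Int) ≤ i2 := by omega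
    rw [find_smudges_helper, fsh_loop, if_neg (by omega : ¬(0 ≤ i1 ∧ i2 < (pattern.length : Int)))]
    by_cases hi1 : i1 < 0
    · rw [if_pos hi1]
    · rw [if_neg hi1, if_pos hle]
  | succ n ih =>
    rw [find_smudges_helper, fsh_loop]
    by_cases hi1 : i1 < 0
    · rw [if_pos hi1, if_neg (by omega : ¬(0 ≤ i1 ∧ i2 < (pattern.length : Int)))]
    · by_cases hi2 : (pattern.length : Int) ≤ i2
      · rw [if_neg hi1, if_pos hi2, if_neg (by omega : ¬(0 ≤ i1 ∧ i2 < (pattern.length : Int)))]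
      · have hcond : 0 ≤ i1 ∧ i2 < (pattern.length : Int) := ⟨by omega, by omega⟩
        simp only [if_neg hi1, if_neg hi2, if_pos hcond]
        have h0 := hrows 0 (by omega) (by simpa using by omega)
        simp only [Nat.cast_zero, sub_zero, add_zero] at h0
        have hrows' : ∀ k : ℕ, (k : Int) ≤ i1 - 1 → (i2 + 1) + (k : Int) < (pattern.length : Int) →
            fsh_get pattern ((i1 - 1) - (k : Int)) = fsh_get pattern ((i2 + 1) + (k : Int)) ∨
            (fsh_get pattern ((i1 - 1) - (k : Int))).toList.length ≤ (fsh_get pattern ((i2 + 1) + (k : Int))).toList.length := by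
          intro k hk hk2
          have := hrows (k + 1) (by push_cast; omega) (by push_cast; omega)
          push_cast at this ⊢
          convert this using 3 <;> ring_nf
        have hstep : (if (fsh_get pattern i1).toList ≠ (fsh_get pattern i2).toList then
              (PySem.List.pyRange 0 ((fsh_get pattern i1).toList.length : Int) 1).foldl
                (fun acc index =>
                  if PySem.List.pyGetD (fsh_get pattern i1).toList index ' ' ≠
                      PySem.List.pyGetD (fsh_get pattern i2).toList index ' ' then acc + 1 else acc) s
            else s)
            = s + fsh_rowDiff (fsh_get pattern i1) (fsh_get pattern i2) := by
          rcases h0 with heq | hle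
          · rw [heq, fsh_rowDiff_self]; simp
          · by_cases hne : (fsh_get pattern i1).toList ≠ (fsh_get pattern i2).toList
            · rw [if_pos hne, fsh_foldl_eq _ _ hle s]; rfl
            · replace hne := not_not.mp hne
              rw [if_neg (by simp [hne])]
              unfold fsh_rowDiff
              rw [hne, fsh_countP_self]
              simp
        rw [← hstep]
        exact ih (i1 - 1) (i2 + 1) _ (by omega) (by omega) (by omega) hrows'

-- ===== VERDICT (by name: the statement is the Claim_ definition above) =====
theorem find_smudges_helper_spec : Claim_equal_find_smudges_helper := by
  intro pattern i1 i2 s _ hpre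
  unfold Spec_find_smudges_helper find_smudges_helper_alt
  rcases hpre with h | h | ⟨ha, hb, hc⟩
  · rw [find_smudges_helper, fsh_loop, if_pos h,
      if_neg (by omega : ¬(0 ≤ i1 ∧ i2 < (pattern.length : Int)))]
  · rw [find_smudges_helper, fsh_loop,
      if_neg (by omega : ¬(0 ≤ i1 ∧ i2 < (pattern.length : Int)))]
    by_cases hi1 : i1 < 0
    · rw [if_pos hi1]
    · rw [if_neg hi1, if_pos h]
  · exact fsh_main ((pattern.length : Int) - i2).toNat pattern i1 i2 s (by omega) ha hb
      (fun k hk hk2 => hc k (by omega) hk2)
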